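-- pv_equiv track=rewrite | github.com/nnatchy/Python-2021-1 | grader homework/09/09_NestedList_★★★_Fill_In_Numbers.py | pattern3
-- ===== SOURCE A (Python) =====
-- def pattern3(N):
--     k = 1
--     final = [0]*N
--     templist = [0]*N
--     for i in range(0, N):
--         for j in range(i, N):
--             templist[j] = k
--             k += 1
--         final[i] = templist
--         templist = [0]*N
--     return final
-- ===== SOURCE B (Python) =====
-- def pattern3(N):
--     # row i consists of i zeros followed by a run of consecutive numbers
--     # starting at offset(i) = 1 + i*N - i*(i-1)//2 (cells filled in earlier rows, plus one)
--     return [[0] * i + list(range(1 + i * N - i * (i - 1) // 2,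
--                                  1 + (i + 1) * N - (i + 1) * i // 2))
--             for i in range(N)]
-- ===== Notes on version B (the rewrite author's own statement) =====
-- stated objective: alternative
-- what changed: Replaces the running counter k threaded through two nested loops (with mutable temp rows written in place) by a closed-form per-row offset: row i is built directly as i zeros followed by the consecutive run starting at 1 + i*N - i*(i-1)//2, with no carried state between rows.
import Mathlib
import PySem

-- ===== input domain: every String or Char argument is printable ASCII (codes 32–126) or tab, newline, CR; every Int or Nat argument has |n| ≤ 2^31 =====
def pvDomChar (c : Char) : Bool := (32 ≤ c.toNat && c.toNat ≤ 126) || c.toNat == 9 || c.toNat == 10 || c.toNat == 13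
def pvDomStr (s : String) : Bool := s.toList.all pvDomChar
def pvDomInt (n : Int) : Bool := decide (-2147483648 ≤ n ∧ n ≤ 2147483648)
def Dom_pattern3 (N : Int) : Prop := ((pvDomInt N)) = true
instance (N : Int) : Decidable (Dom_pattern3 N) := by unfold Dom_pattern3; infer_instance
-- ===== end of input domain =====

-- B replaces A's running counter k (threaded through two nested loops with in-place row writes)
-- by a closed-form offset per row: row i is i zeros followed by the consecutive run starting at
-- 1 + i*N - i*(i-1)//2; same O(N^2) output size (objective: alternative).

-- ===== PORT A =====
-- Python's `final = [0]*N` holds int-0 placeholders that are all overwritten (final[i] is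
-- assigned for every i in range(N)); we use [] : List Int as the placeholder value.
def pattern3 (N : Int) : List (List Int) :=
  let res :=
    (PySem.List.pyRange 0 N 1).foldl
      (fun (st : Int × List (List Int)) (i : Int) =>
        -- inner loop: for j in range(i, N): templist[j] = k; k += 1
        let inner :=
          (PySem.List.pyRange i N 1).foldl
            (fun (st2 : Int × List Int) (j : Int) => (st2.1 + 1, st2.2.set j.toNat st2.1))
            (st.1, List.replicate N.toNat (0 : Int))
        (inner.1, st.2.set i.toNat inner.2))
      (1, List.replicate N.toNat ([] : List Int))
  res.2

-- ===== PORT B =====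
def pattern3_alt (N : Int) : List (List Int) :=
  (PySem.List.pyRange 0 N 1).map (fun i =>
    List.replicate i.toNat (0 : Int) ++
      PySem.List.pyRange (1 + i * N - PySem.Int.floordiv (i * (i - 1)) 2)
                         (1 + (i + 1) * N - PySem.Int.floordiv ((i + 1) * i) 2) 1)

-- ===== PRECONDITION & SPEC =====
def Spec_pattern3 (N : Int) (out : List (List Int)) : Prop := out = pattern3_alt N
instance (N : Int) (out : List (List Int)) : Decidable (Spec_pattern3 N out) := by unfold Spec_pattern3; infer_instance

-- ===== CLAIM (what is proved, stated in full; the proofs are below) =====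
def Claim_equal_pattern3 : Prop := ∀ (N : Int), Dom_pattern3 N → Spec_pattern3 N (pattern3 N)

-- ===== LEMMAS AND PROOFS =====

-- triangular numbers: tri i = 0 + 1 + … + (i-1)
def tri : Nat → Int
  | 0 => 0
  | (i+1) => tri i + i

-- the counter value k at the start of row i (n = grid side)
def K (n i : Nat) : Int := 1 + (i : Int) * n - tri i

lemma tri_mul (r : Nat) : (r : Int) * ((r : Int) - 1) = 2 * tri r := by
  induction r with
  | zero => simp [tri]
  | succ r ih => simp only [tri]; push_cast; push_cast at ih; nlinarith [ih]

lemma floordiv_tri (r : Nat) :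
    PySem.Int.floordiv ((r : Int) * ((r : Int) - 1)) 2 = tri r := by
  rw [tri_mul]; simp [PySem.Int.floordiv]

-- the inner loop fills positions a..a+m-1 with k, k+1, … into a zero row
lemma inner_spec (n a : Nat) (k : Int) :
    ∀ m : Nat, a + m ≤ n →
    (List.range m).foldl
      (fun (st2 : Int × List Int) (t : Nat) => (st2.1 + 1, st2.2.set (a + t) st2.1))
      (k, List.replicate n (0 : Int))
    = (k + m,
       (List.range n).map (fun j => if a ≤ j ∧ j < a + m then k + ((j : Int) - a) else 0)) := by
  intro m
  induction m with
  | zero =>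
    intro _
    simp only [List.range_zero, List.foldl_nil, Nat.cast_zero, add_zero]
    congr 1
    apply List.ext_getElem
    · simp
    · intro j h1 h2
      simp only [List.getElem_replicate, List.getElem_map, List.getElem_range]
      rw [if_neg]; omega
  | succ m ih =>
    intro h
    rw [List.range_succ, List.foldl_append, ih (by omega), List.foldl_cons, List.foldl_nil]
    simp only []
    refine Prod.ext ?_ ?_
    · show k + (m : Int) + 1 = k + ((m + 1 : Nat) : Int); push_cast; ring
    show _ = _
    apply List.ext_getElem
    · simp
    intro j h1 h2
    simp only [List.length_set, List.length_map, List.length_range] at h1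
    rw [List.getElem_set]
    simp only [List.getElem_map, List.getElem_range]
    split_ifs with h3 h4 h5 h5 <;> try (first | rfl | omega)

-- invariant of the outer loop after i rows: counter = K n i, rows 0..i-1 are filled
lemma outer_spec (n : Nat) :
    ∀ i : Nat, i ≤ n →
    ((List.range i).map (fun t : Nat => (t : Int))).foldl
      (fun (st : Int × List (List Int)) (i : Int) =>
        let inner :=
          (PySem.List.pyRange i (n : Int) 1).foldl
            (fun (st2 : Int × List Int) (j : Int) => (st2.1 + 1, st2.2.set j.toNat st2.1))
            (st.1, List.replicate n (0 : Int))
        (inner.1, st.2.set i.toNat inner.2))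
      (1, List.replicate n ([] : List Int))
    = (K n i,
       (List.range n).map (fun r =>
         if r < i then
           (List.range n).map (fun j => if r ≤ j ∧ j < r + (n - r) then K n r + ((j : Int) - r) else 0)
         else [])) := by
  intro i
  induction i with
  | zero =>
    intro _
    simp only [List.range_zero, List.map_nil, List.foldl_nil]
    refine Prod.ext ?_ ?_
    · show (1 : Int) = K n 0; simp [K, tri]
    · show List.replicate n ([] : List Int) = _
      apply List.ext_getElem
      · simp
      · intro r h1 h2
        simp only [List.getElem_replicate, List.getElem_map, List.getElem_range]
        rw [if_neg]; omega
  | succ i ih =>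
    intro h
    rw [List.range_succ, List.map_append, List.foldl_append, ih (by omega)]
    simp only [List.map_cons, List.map_nil, List.foldl_cons, List.foldl_nil]
    rw [PySem.List.pyRange_one]
    have hn : (((n : Int) - (i : Nat)).toNat) = n - i := by omega
    rw [hn, List.foldl_map]
    simp only [← Nat.cast_add, Int.toNat_natCast]
    rw [inner_spec n i _ (n - i) (by omega)]
    refine Prod.ext ?_ ?_
    · show K n i + ((n - i : Nat) : Int) = K n (i + 1)
      simp only [K, tri]
      push_cast [Nat.cast_sub (by omega : i ≤ n)]
      ring
    · show List.set _ ((i : Int)).toNat _ = _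
      rw [Int.toNat_natCast]
      apply List.ext_getElem
      · simp
      intro r h1 h2
      simp only [List.length_set, List.length_map, List.length_range] at h1
      rw [List.getElem_set]
      simp only [List.getElem_map, List.getElem_range]
      split_ifs with h3 h4 h5 h5 <;> try (first | rfl | omega)
      · subst h3; rfl

lemma pattern3_eq_alt (N : Int) : pattern3 N = pattern3_alt N := by
  by_cases h : N ≤ 0
  · have h0 : N.toNat = 0 := by omega
    simp [pattern3, pattern3_alt, PySem.List.pyRange_one_eq_nil h, h0]
  · have hN : N = (N.toNat : Int) := by omega
    set n := N.toNat with hn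
    rw [hN]
    have hr : PySem.List.pyRange 0 (n : Int) 1 = (List.range n).map (fun t : Nat => (t : Int)) := by
      rw [PySem.List.pyRange_one]
      simp
    unfold pattern3
    simp only [hr, Int.toNat_natCast]
    rw [outer_spec n n le_rfl]
    unfold pattern3_alt
    simp only [hr, List.map_map]
    apply List.map_congr_left
    intro r hr1
    simp only [List.mem_range] at hr1
    rw [if_pos hr1]
    simp only [Function.comp_apply, Int.toNat_natCast]
    have e1 : PySem.Int.floordiv ((r : Int) * ((r : Int) - 1)) 2 = tri r := floordiv_tri r
    have e2 : PySem.Int.floordiv (((r : Int) + 1) * (r : Int)) 2 = tri (r + 1) := by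
      have : ((r : Int) + 1) * (r : Int) = ((r + 1 : Nat) : Int) * (((r + 1 : Nat) : Int) - 1) := by
        push_cast; ring
      rw [this, floordiv_tri]
    rw [e1, e2]
    rw [PySem.List.pyRange_one]
    have hlen : ((1 + ((r : Int) + 1) * n - tri (r + 1)) - (1 + (r : Int) * n - tri r)).toNat
        = n - r := by
      simp only [tri]
      have : (1 + ((r : Int) + 1) * n - (tri r + r)) - (1 + (r : Int) * n - tri r)
          = (n : Int) - r := by ring
      rw [this]; omega
    rw [hlen]
    apply List.ext_getElem
    · simp; omega
    intro j h1 h2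
    simp only [List.length_map, List.length_range] at h1
    simp only [List.getElem_map, List.getElem_range]
    by_cases hc : j < r
    · rw [List.getElem_append_left (by simpa using hc)]
      simp only [List.getElem_replicate]
      rw [if_neg]; omega
    · rw [List.getElem_append_right (by simpa using hc)]
      simp only [List.getElem_map, List.getElem_range, List.length_replicate]
      rw [if_pos (by omega)]
      simp only [K]
      push_cast [Nat.cast_sub (by omega : r ≤ j)]
      ring

-- ===== VERDICT (by name: the statement is the Claim_ definition above) =====
theorem pattern3_spec : Claim_equal_pattern3 := by
  intro N _
  unfold Spec_pattern3
  exact pattern3_eq_alt N
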